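-- pv_equiv track=rewrite | github.com/Ashutosh-Srivastav/Twitter_Senti_Analysis | labelller_pretrained_bert.py | tweet_preprocessor
-- ===== SOURCE A (Python) =====
-- def tweet_preprocessor(tweet):
--     # precprcess tweet
--     tweet_words = []
--
--     for word in tweet.split(' '):
--         if word.startswith('@') and len(word) > 1:
--             word = '@user'
--
--         elif word.startswith('http'):
--             word = "http"
--         tweet_words.append(word)
--
--     tweet_proc = " ".join(tweet_words)
--     return tweet_proc
-- ===== SOURCE B (Python) =====
-- def tweet_preprocessor(tweet):
--     # span rewriting: jump from token start to token start with str.find;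
--     # only tokens that need changing are rebuilt, all other text is sliced
--     # through verbatim (no split/join over the whole tweet)
--     res = []
--     i = 0
--     n = len(tweet)
--     while i < n:
--         j = tweet.find(' ', i)
--         if j == -1:
--             j = n
--         if tweet.startswith('@', i) and j - i > 1:
--             res.append('@user')
--         elif tweet.startswith('http', i):
--             res.append('http')
--         else:
--             res.append(tweet[i:j])
--         if j < n:
--             res.append(' ')
--         i = j + 1
--     return ''.join(res)
-- ===== Notes on version B (the rewrite author's own statement) =====
-- stated objective: alternative
-- what changed: replaces A's split-into-a-word-list / transform-every-word / join pipeline with an index-based span rewriter: str.find jumps from token start to token start, matched spans are replaced in place and everything else is sliced through verbatim, so no word list is ever materialised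
import Mathlib
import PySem

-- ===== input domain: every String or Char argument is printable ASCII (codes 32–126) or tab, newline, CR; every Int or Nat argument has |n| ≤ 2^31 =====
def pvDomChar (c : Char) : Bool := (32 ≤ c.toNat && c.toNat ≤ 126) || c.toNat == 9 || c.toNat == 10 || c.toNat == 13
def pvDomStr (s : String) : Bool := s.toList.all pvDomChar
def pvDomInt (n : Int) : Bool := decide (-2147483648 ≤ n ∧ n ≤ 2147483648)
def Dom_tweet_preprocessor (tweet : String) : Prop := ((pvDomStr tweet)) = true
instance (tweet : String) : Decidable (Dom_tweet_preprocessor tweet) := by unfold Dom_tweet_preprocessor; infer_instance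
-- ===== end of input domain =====

-- B replaces A's split-into-a-word-list / transform-every-word / join pipeline by an
-- index-based span rewriter that jumps from token start to token start and copies
-- untouched text through verbatim (objective: alternative, same cost).

-- ===== PORT A =====
def tweet_preprocessor (tweet : String) : String :=
  let tweet_words : List String :=
    ((PySem.Str.split? tweet " ").getD []).foldl
      (fun acc word =>
        let word :=
          if PySem.Str.startswith word "@" && decide (1 < PySem.Str.len word) then "@user"
          else if PySem.Str.startswith word "http" then "http"
          else word
        acc ++ [word]) []
  PySem.Str.join " " tweet_words

-- ===== PORT B =====
-- Source B's while loop over token starts, transcribed as recursion on the suffix of the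
-- tweet beginning at index i (exact: tweet.find(' ', i) is the first space of the
-- suffix, so tweet[i:j] = takeWhile (!= ' ') and the next iteration starts after it;
-- tweet.startswith('@', i) is c = '@', tweet.startswith('http', i) is the isPrefixOf).
def pvScan : List Char → List Char
  | [] => []
  | c :: cs =>
    let tok := (c :: cs).takeWhile (fun x => x != ' ')
    let piece :=
      if c = '@' ∧ 1 < tok.length then "@user".toList
      else if "http".toList.isPrefixOf (c :: cs) then "http".toList
      else tok
    let rest := (c :: cs).dropWhile (fun x => x != ' ')
    if rest.isEmpty then piece else piece ++ ' ' :: pvScan rest.tail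
termination_by l => l.length
decreasing_by
  rename_i hne
  simp only [List.isEmpty_iff] at hne
  cases hd : List.dropWhile (fun x => x != ' ') (c :: cs) with
  | nil => exact absurd hd hne
  | cons d r =>
    have h := List.length_dropWhile_le (fun x => x != ' ') (c :: cs)
    rw [hd] at h
    simp only [List.length_cons, List.tail_cons] at h ⊢
    omega

def tweet_preprocessor_alt (tweet : String) : String :=
  String.ofList (pvScan tweet.toList)

-- ===== PRECONDITION & SPEC =====
def Spec_tweet_preprocessor (tweet : String) (out : String) : Prop := out = tweet_preprocessor_alt tweet
instance (tweet : String) (out : String) : Decidable (Spec_tweet_preprocessor tweet out) := by unfold Spec_tweet_preprocessor; infer_instance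

-- ===== CLAIM (what is proved, stated in full; the proofs are below) =====
def Claim_equal_tweet_preprocessor : Prop := ∀ (tweet : String), Dom_tweet_preprocessor tweet → Spec_tweet_preprocessor tweet (tweet_preprocessor tweet)

-- ===== LEMMAS AND PROOFS =====

-- the common token transform both programs implement
def pvTok (w : List Char) : List Char :=
  if 1 < w.length ∧ w.headI = '@' then "@user".toList
  else if "http".toList.isPrefixOf w then "http".toList
  else w

-- clean structural recursion equal to PySem.Chars.splitOn · [' ']
def pvSp : List Char → List (List Char)
  | [] => [[]]
  | c :: rest => if c = ' ' then [] :: pvSp rest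
      else (c :: (pvSp rest).headI) :: (pvSp rest).tail

theorem pvSp_ne_nil (l : List Char) : pvSp l ≠ [] := by
  cases l with
  | nil => simp [pvSp]
  | cons c rest => simp only [pvSp]; split <;> simp

theorem pvSp_headI_tail (l : List Char) : (pvSp l).headI :: (pvSp l).tail = pvSp l := by
  cases h : pvSp l with
  | nil => exact absurd h (pvSp_ne_nil l)
  | cons a t => rfl

theorem splitOn_go_eq (fuel : Nat) (l cur : List Char) (accs : List (List Char))
    (h : l.length < fuel) :
    PySem.Chars.splitOn.go [' '] fuel l cur accs
      = accs.reverse ++ (cur.reverse ++ (pvSp l).headI) :: (pvSp l).tail := by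
  induction fuel generalizing l cur accs with
  | zero => omega
  | succ fuel ih =>
    cases l with
    | nil => simp [PySem.Chars.splitOn.go, pvSp]
    | cons c rest =>
      simp only [PySem.Chars.splitOn.go]
      simp only [List.length_cons] at h
      by_cases hc : c = ' '
      · subst hc
        have hp : [' '].isPrefixOf (' ' :: rest) = true := by simp [List.isPrefixOf]
        rw [if_pos hp]
        show PySem.Chars.splitOn.go [' '] fuel rest [] (cur.reverse :: accs) = _
        rw [ih rest [] (cur.reverse :: accs) (by omega)]
        simp [pvSp, pvSp_headI_tail]
      · have hp : [' '].isPrefixOf (c :: rest) = false := by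
          simp [List.isPrefixOf]
          exact fun hcc => absurd hcc.symm hc
        rw [if_neg (by simp [hp])]
        rw [ih rest (c :: cur) accs (by omega)]
        simp [pvSp, hc]

theorem splitOn_eq_pvSp (s : List Char) :
    PySem.Chars.splitOn s [' '] = pvSp s := by
  have := splitOn_go_eq (s.length + 1) s [] [] (by omega)
  simpa [PySem.Chars.splitOn, pvSp_headI_tail] using this

theorem join_cons_cons (sep a b : List Char) (l : List (List Char)) :
    PySem.Chars.join sep (a :: b :: l) = a ++ sep ++ PySem.Chars.join sep (b :: l) := by
  simp [PySem.Chars.join, List.intercalate, List.intersperse]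

-- A's word transform (on Strings) computes pvTok on the character list
theorem fixA_toList (w : List Char) :
    (if PySem.Str.startswith (String.ofList w) "@" && decide (1 < PySem.Str.len (String.ofList w)) then ("@user" : String)
     else if PySem.Str.startswith (String.ofList w) "http" then "http"
     else String.ofList w).toList = pvTok w := by
  have hAiff : (PySem.Chars.startswith w "@".toList && decide ((1 : Int) < (w.length : Int))) = true
      ↔ (1 < w.length ∧ w.headI = '@') := by
    rw [Bool.and_eq_true, PySem.Chars.startswith_iff, decide_eq_true_iff]
    cases w with
    | nil => simp
    | cons c t =>
      rw [show ("@".toList : List Char) = ['@'] from rfl, List.cons_prefix_cons]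
      simp only [List.headI, List.length_cons]
      constructor
      · rintro ⟨⟨h1, -⟩, h2⟩
        exact ⟨by exact_mod_cast h2, h1.symm⟩
      · rintro ⟨h1, h2⟩
        exact ⟨⟨h2.symm, List.nil_prefix⟩, by exact_mod_cast h1⟩
  have hHiff : PySem.Chars.startswith w "http".toList = true
      ↔ "http".toList.isPrefixOf w = true := by
    rw [PySem.Chars.startswith_iff, List.isPrefixOf_iff_prefix]
  simp only [PySem.Str.startswith_eq, String.toList_ofList, PySem.Str.len_eq]
  rw [apply_ite String.toList, apply_ite String.toList]
  unfold pvTok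
  by_cases h1 : 1 < w.length ∧ w.headI = '@'
  · rw [if_pos (hAiff.mpr h1), if_pos h1]
  · rw [if_neg (fun hx => h1 (hAiff.mp hx)), if_neg h1]
    by_cases h2 : "http".toList.isPrefixOf w = true
    · rw [if_pos (hHiff.mpr h2), if_pos h2]
    · rw [if_neg (fun hx => h2 (hHiff.mp hx)), if_neg h2, String.toList_ofList]

-- A computes join-of-fixed-tokens
theorem tweet_preprocessor_eq (tweet : String) :
    (tweet_preprocessor tweet).toList
      = PySem.Chars.join [' '] ((pvSp tweet.toList).map pvTok) := by
  unfold tweet_preprocessor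
  have hsplit : PySem.Str.split? tweet " " = some ((pvSp tweet.toList).map String.ofList) := by
    simp [PySem.Str.split?, PySem.Chars.split?, splitOn_eq_pvSp]
  rw [hsplit]
  simp only [Option.getD_some]
  rw [PySem.List.foldl_append_singleton_eq_map]
  simp only [List.nil_append]
  rw [PySem.Str.toList_join]
  have hsep : (" " : String).toList = [' '] := rfl
  rw [hsep, List.map_map, List.map_map]
  congr 1
  apply List.map_congr_left
  intro w _
  simpa using fixA_toList w

-- prefixes made of non-space characters survive takeWhile
theorem prefix_takeWhile_iff (q : Char → Bool) (p : List Char) (h : ∀ x ∈ p, q x = true) :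
    ∀ l : List Char, (p <+: l ↔ p <+: l.takeWhile q) := by
  induction p with
  | nil => intro l; simp
  | cons a p' ih =>
    intro l
    cases l with
    | nil => simp [List.takeWhile]
    | cons b m =>
      have ha : q a = true := h a (by simp)
      by_cases hb : q b = true
      · rw [List.takeWhile_cons_of_pos hb]
        simp only [List.cons_prefix_cons]
        exact and_congr_right fun _ => ih (fun x hx => h x (by simp [hx])) m
      · rw [List.takeWhile_cons_of_neg hb]
        simp only [List.cons_prefix_cons]
        constructor
        · rintro ⟨hab, -⟩; exact absurd (hab ▸ ha) hb
        · intro hx; exact absurd (List.prefix_nil.mp hx) (by simp)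

-- pvSp in terms of takeWhile/dropWhile
theorem pvSp_take_drop (s : List Char) :
    pvSp s = (s.takeWhile (fun x => x != ' ')) ::
      (match s.dropWhile (fun x => x != ' ') with
       | [] => []
       | _ :: r => pvSp r) := by
  induction s with
  | nil => simp [pvSp]
  | cons c cs ih =>
    by_cases hc : c = ' '
    · subst hc
      simp [pvSp]
    · have hc' : ((fun x => x != ' ') c) = true := by simpa using hc
      rw [List.takeWhile_cons_of_pos (p := fun x => x != ' ') hc',
        List.dropWhile_cons_of_pos (p := fun x => x != ' ') hc']
      simp only [pvSp]
      rw [if_neg hc, ih]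
      simp

-- B's piece equals pvTok of the token
theorem piece_eq (c : Char) (cs : List Char) :
    (if c = '@' ∧ 1 < ((c :: cs).takeWhile (fun x => x != ' ')).length then "@user".toList
     else if "http".toList.isPrefixOf (c :: cs) then "http".toList
     else (c :: cs).takeWhile (fun x => x != ' '))
      = pvTok ((c :: cs).takeWhile (fun x => x != ' ')) := by
  by_cases hc : c = ' '
  · subst hc
    rw [List.takeWhile_cons_of_neg (p := fun x => x != ' ') (by simp)]
    simp [pvTok]
  · have hc' : ((fun x => x != ' ') c) = true := by simpa using hc
    rw [List.takeWhile_cons_of_pos (p := fun x => x != ' ') hc']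
    have hpre : ("http".toList <+: (c :: cs)) ↔
        ("http".toList <+: (c :: cs).takeWhile (fun x => x != ' ')) :=
      prefix_takeWhile_iff _ "http".toList
        (by
          intro x hx
          rw [show ("http".toList : List Char) = ['h', 't', 't', 'p'] from rfl] at hx
          fin_cases hx <;> rfl) (c :: cs)
    rw [List.takeWhile_cons_of_pos (p := fun x => x != ' ') hc'] at hpre
    unfold pvTok
    have hhead : (c :: cs.takeWhile (fun x => x != ' ')).headI = c := rfl
    rw [hhead]
    have hcond : (c = '@' ∧ 1 < (c :: cs.takeWhile (fun x => x != ' ')).length)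
        ↔ (1 < (c :: cs.takeWhile (fun x => x != ' ')).length ∧ c = '@') := and_comm
    by_cases h1 : c = '@' ∧ 1 < (c :: cs.takeWhile (fun x => x != ' ')).length
    · rw [if_pos h1, if_pos (hcond.mp h1)]
    · rw [if_neg h1, if_neg (fun hx => h1 (hcond.mpr hx))]
      by_cases h2 : "http".toList <+: (c :: cs)
      · rw [if_pos (by simpa using h2), if_pos (by simpa using hpre.mp h2)]
      · rw [if_neg (by simpa using h2), if_neg (by simpa using fun hx => h2 (hpre.mpr hx))]

-- B computes the same join-of-fixed-tokens
theorem pvScan_join (s : List Char) :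
    pvScan s = PySem.Chars.join [' '] ((pvSp s).map pvTok) := by
  induction s using pvScan.induct with
  | case1 =>
    simp [pvScan, pvSp, PySem.Chars.join, List.intercalate, pvTok]
  | case2 c cs _rest h =>
    have hdrop : List.dropWhile (fun x => x != ' ') (c :: cs) = [] := List.isEmpty_iff.mp h
    rw [pvScan]
    simp only [hdrop, List.isEmpty_nil, if_true]
    rw [pvSp_take_drop (c :: cs), hdrop]
    simp only [List.map_cons, List.map_nil]
    rw [piece_eq]
    simp [PySem.Chars.join, List.intercalate]
  | case3 c cs _rest h ih =>
    have hne : List.dropWhile (fun x => x != ' ') (c :: cs) ≠ [] :=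
      fun hx => h (List.isEmpty_iff.mpr hx)
    obtain ⟨d, r, hdrop⟩ := List.exists_cons_of_ne_nil hne
    rw [show (_rest : List Char) = d :: r from hdrop] at ih
    simp only [List.tail_cons] at ih
    rw [pvScan]
    simp only [hdrop, List.isEmpty_cons, Bool.false_eq_true, if_false, List.tail_cons]
    rw [pvSp_take_drop (c :: cs), hdrop]
    simp only [List.map_cons]
    rw [piece_eq, ih]
    cases hr : pvSp r with
    | nil => exact absurd hr (pvSp_ne_nil r)
    | cons a ts =>
      rw [List.map_cons, join_cons_cons]
      simp

-- ===== VERDICT (by name: the statement is the Claim_ definition above) =====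
theorem tweet_preprocessor_spec : Claim_equal_tweet_preprocessor := by
  intro tweet _
  show tweet_preprocessor tweet = tweet_preprocessor_alt tweet
  unfold tweet_preprocessor_alt
  rw [pvScan_join, ← tweet_preprocessor_eq tweet]
  exact String.ofList_toList.symm
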